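-- pv_equiv track=rewrite | github.com/pypi-data/pypi-mirror-99 | packages/vsg/vsg-3.0.0.tar.gz/vsg-3.0.0/vsg/tokens.py | combine_string_literals
-- ===== SOURCE A (Python) =====
-- def combine_string_literals(lChars):
--     lReturn = []
--     sLiteral = ''
--     bLiteral = False
--     for sChar in lChars:
--         if sChar == '"' and not bLiteral:
--             sLiteral += sChar
--             bLiteral = True
--             continue
--         if not bLiteral:
--             lReturn.append(sChar)
--         else:
--             sLiteral += sChar
--         if sChar == '"' and bLiteral:
--             bLiteral = False
--             lReturn.append(sLiteral)
--             sLiteral = ''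
--
--     return lReturn
-- ===== SOURCE B (Python) =====
-- def combine_string_literals(lChars):
--     out = []
--     i = 0
--     n = len(lChars)
--     while i < n:
--         if lChars[i] == '"':
--             try:
--                 j = lChars.index('"', i + 1)
--             except ValueError:
--                 break
--             out.append(''.join(lChars[i:j + 1]))
--             i = j + 1
--         else:
--             out.append(lChars[i])
--             i += 1
--     return out
-- ===== Notes on version B (the rewrite author's own statement) =====
-- stated objective: idiomatic
-- what changed: Replaces A's accumulator state machine (bLiteral flag + growing sLiteral) with an index/two-pointer scan: on an opening quote it searches forward for the closing quote with list.index and joins the slice as one token, breaking if unterminated.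
import Mathlib
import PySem

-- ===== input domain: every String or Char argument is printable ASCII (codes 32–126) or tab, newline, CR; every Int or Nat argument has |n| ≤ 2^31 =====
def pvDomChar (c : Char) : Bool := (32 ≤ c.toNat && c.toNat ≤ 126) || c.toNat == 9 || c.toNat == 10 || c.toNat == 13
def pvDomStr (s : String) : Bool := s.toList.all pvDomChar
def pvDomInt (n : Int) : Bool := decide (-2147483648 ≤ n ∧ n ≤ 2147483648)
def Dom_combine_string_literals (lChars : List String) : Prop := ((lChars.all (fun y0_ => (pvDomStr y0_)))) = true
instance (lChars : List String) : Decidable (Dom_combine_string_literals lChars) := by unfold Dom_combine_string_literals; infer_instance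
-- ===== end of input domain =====

-- B replaces A's flag/accumulator state machine with an index scan that finds each
-- closing quote forward and joins the slice into one token (idiomatic; same cost).


-- ===== PORT A =====
-- one loop iteration of A: state = (lReturn, sLiteral, bLiteral)
def csl_step (st : List String × String × Bool) (c : String) : List String × String × Bool :=
  if c = "\"" ∧ st.2.2 = false then (st.1, st.2.1 ++ c, true)
  else
    let p : List String × String :=
      if st.2.2 = false then (st.1 ++ [c], st.2.1) else (st.1, st.2.1 ++ c)
    if c = "\"" ∧ st.2.2 = true then (p.1 ++ [p.2], "", false) else (p.1, p.2, st.2.2)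

def combine_string_literals (lChars : List String) : List String :=
  (lChars.foldl csl_step ([], "", false)).1

-- ===== PORT B =====
-- inner forward scan for the closing quote: returns (segment up to and including it, remainder)
def csl_findClose : List String → Option (List String × List String)
  | [] => none
  | c :: rest =>
    if c = "\"" then some ([c], rest)
    else
      match csl_findClose rest with
      | none => none
      | some (seg, rem) => some (c :: seg, rem)

theorem csl_findClose_length : ∀ (xs seg rem : List String),
    csl_findClose xs = some (seg, rem) → rem.length < xs.length := by
  intro xs
  induction xs with
  | nil => intro seg rem h; simp [csl_findClose] at h
  | cons c rest ih =>
    intro seg rem h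
    by_cases hc : c = "\""
    · simp [csl_findClose, hc] at h
      simp [← h.2]
    · simp [csl_findClose, hc] at h
      cases hfc : csl_findClose rest with
      | none => rw [hfc] at h; simp at h
      | some p =>
        rw [hfc] at h
        obtain ⟨seg', rem'⟩ := p
        simp at h
        have := ih seg' rem' hfc
        simp [← h.2]
        omega

def combine_string_literals_alt (lChars : List String) : List String :=
  match lChars with
  | [] => []
  | c :: rest =>
    if c = "\"" then
      match h : csl_findClose rest with
      | none => []
      | some (seg, rem) => String.join (c :: seg) :: combine_string_literals_alt rem
    else c :: combine_string_literals_alt rest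
termination_by lChars.length
decreasing_by
  · exact Nat.lt_succ_of_lt (csl_findClose_length _ _ _ h)
  · simp

-- ===== PRECONDITION & SPEC =====
def Spec_combine_string_literals (lChars : List String) (out : List String) : Prop := out = combine_string_literals_alt lChars
instance (lChars : List String) (out : List String) : Decidable (Spec_combine_string_literals lChars out) := by unfold Spec_combine_string_literals; infer_instance

-- ===== CLAIM (what is proved, stated in full; the proofs are below) =====
def Claim_equal_combine_string_literals : Prop := ∀ (lChars : List String), Dom_combine_string_literals lChars → Spec_combine_string_literals lChars (combine_string_literals lChars)

-- ===== LEMMAS AND PROOFS =====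

theorem csl_join_cons (a : String) (l : List String) :
    String.join (a :: l) = a ++ String.join l := by
  have h : ∀ (l : List String) (x y : String),
      l.foldl (· ++ ·) (x ++ y) = x ++ l.foldl (· ++ ·) y := by
    intro l
    induction l with
    | nil => intro x y; rfl
    | cons c cs ih => intro x y; simp only [List.foldl]; rw [String.append_assoc, ih]
  show (a :: l).foldl (· ++ ·) "" = a ++ l.foldl (· ++ ·) ""
  simp only [List.foldl]
  have := h l a ""
  simpa using this

theorem csl_alt_nil : combine_string_literals_alt [] = [] := by
  rw [combine_string_literals_alt]

theorem csl_alt_cons_other (c : String) (rest : List String) (hc : ¬ c = "\"") :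
    combine_string_literals_alt (c :: rest) = c :: combine_string_literals_alt rest := by
  rw [combine_string_literals_alt]
  simp [hc]

theorem csl_alt_cons_quote_none (rest : List String) (h : csl_findClose rest = none) :
    combine_string_literals_alt ("\"" :: rest) = [] := by
  rw [combine_string_literals_alt]
  simp only [reduceIte]
  split <;> simp_all

theorem csl_alt_cons_quote_some (rest seg rem : List String)
    (h : csl_findClose rest = some (seg, rem)) :
    combine_string_literals_alt ("\"" :: rest) =
      String.join ("\"" :: seg) :: combine_string_literals_alt rem := by
  rw [combine_string_literals_alt]
  simp only [reduceIte]
  split <;> simp_all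

theorem csl_main : ∀ (n : Nat),
    (∀ (xs : List String) (ret : List String), xs.length ≤ n →
      (xs.foldl csl_step (ret, "", false)).1 = ret ++ combine_string_literals_alt xs)
    ∧
    (∀ (xs : List String) (ret : List String) (lit : String), xs.length ≤ n →
      (xs.foldl csl_step (ret, lit, true)).1 =
        match csl_findClose xs with
        | none => ret
        | some (seg, rem) => ret ++ (lit ++ String.join seg) :: combine_string_literals_alt rem) := by
  intro n
  induction n with
  | zero =>
    constructor
    · intro xs ret h
      have : xs = [] := List.length_eq_zero_iff.mp (Nat.le_zero.mp h)
      subst this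
      simp [csl_alt_nil]
    · intro xs ret lit h
      have : xs = [] := List.length_eq_zero_iff.mp (Nat.le_zero.mp h)
      subst this
      simp [csl_findClose]
  | succ n ih =>
    constructor
    · intro xs ret h
      cases xs with
      | nil => simp [csl_alt_nil]
      | cons c rest =>
        simp only [List.length_cons, Nat.succ_le_succ_iff] at h
        by_cases hc : c = "\""
        · subst hc
          have hstep : csl_step (ret, "", false) "\"" = (ret, "\"", true) := by
            simp [csl_step]
          simp only [List.foldl, hstep]
          rw [ih.2 rest ret "\"" h]
          cases hfc : csl_findClose rest with
          | none => simp [csl_alt_cons_quote_none rest hfc]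
          | some p =>
            obtain ⟨seg, rem⟩ := p
            simp only [csl_alt_cons_quote_some rest seg rem hfc, csl_join_cons]
        · have hstep : csl_step (ret, "", false) c = (ret ++ [c], "", false) := by
            simp [csl_step, hc]
          simp only [List.foldl, hstep]
          rw [(ih).1 rest (ret ++ [c]) h, csl_alt_cons_other c rest hc]
          simp
    · intro xs ret lit h
      cases xs with
      | nil => simp [csl_findClose]
      | cons c rest =>
        simp only [List.length_cons, Nat.succ_le_succ_iff] at h
        by_cases hc : c = "\""
        · subst hc
          have hstep : csl_step (ret, lit, true) "\"" = (ret ++ [lit ++ "\""], "", false) := by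
            simp [csl_step]
          simp only [List.foldl, hstep]
          rw [ih.1 rest (ret ++ [lit ++ "\""]) h]
          have hfc : csl_findClose ("\"" :: rest) = some (["\""], rest) := by
            simp [csl_findClose]
          rw [hfc]
          have : String.join ["\""] = "\"" := by decide
          simp [this, String.append_assoc]
        · have hstep : csl_step (ret, lit, true) c = (ret, lit ++ c, true) := by
            simp [csl_step, hc]
          simp only [List.foldl, hstep]
          rw [ih.2 rest ret (lit ++ c) h]
          cases hfc : csl_findClose rest with
          | none => simp [csl_findClose, hc, hfc]
          | some p =>
            obtain ⟨seg, rem⟩ := p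
            have : csl_findClose (c :: rest) = some (c :: seg, rem) := by
              simp [csl_findClose, hc, hfc]
            rw [this]
            simp [csl_join_cons, String.append_assoc]

theorem combine_string_literals_spec : Claim_equal_combine_string_literals := by
  intro xs _
  unfold Spec_combine_string_literals combine_string_literals
  simpa using (csl_main xs.length).1 xs [] le_rfl
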